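-- pv_equiv track=rewrite | github.com/dhruvi0308/Python | sumdiagonal.py | calculate_diagonal_sums
-- ===== SOURCE A (Python) =====
-- def calculate_diagonal_sums(matrix):
--     n = len(matrix)
--     main_diagonal_sum = 0
--     above_diagonal_sum = 0
--     below_diagonal_sum = 0
--
--     for i in range(n):
--         for j in range(n):
--             if i == j:
--                 main_diagonal_sum += matrix[i][j]
--             elif i < j:
--                 above_diagonal_sum += matrix[i][j]
--             elif i > j:
--                 below_diagonal_sum += matrix[i][j]
--     return main_diagonal_sum, above_diagonal_sum, below_diagonal_sum
-- ===== SOURCE B (Python) =====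
-- def calculate_diagonal_sums(matrix):
--     n = len(matrix)
--     main_diagonal_sum = 0
--     above_diagonal_sum = 0
--     below_diagonal_sum = 0
--     for i, row in enumerate(matrix):
--         main_diagonal_sum += row[i]
--         above_diagonal_sum += sum(row[i + 1:n])
--         below_diagonal_sum += sum(row[:i])
--     return main_diagonal_sum, above_diagonal_sum, below_diagonal_sum
-- ===== Notes on version B (the rewrite author's own statement) =====
-- stated objective: simpler
-- what changed: Replaces the nested n*n loop with i==j/i<j/i>j branching by a single pass over enumerate(matrix) that takes the diagonal element directly and sums two row slices, removing the inner index loop (constant-factor speedup: built-in sum over slices instead of per-element Python branching).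
import Mathlib
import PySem

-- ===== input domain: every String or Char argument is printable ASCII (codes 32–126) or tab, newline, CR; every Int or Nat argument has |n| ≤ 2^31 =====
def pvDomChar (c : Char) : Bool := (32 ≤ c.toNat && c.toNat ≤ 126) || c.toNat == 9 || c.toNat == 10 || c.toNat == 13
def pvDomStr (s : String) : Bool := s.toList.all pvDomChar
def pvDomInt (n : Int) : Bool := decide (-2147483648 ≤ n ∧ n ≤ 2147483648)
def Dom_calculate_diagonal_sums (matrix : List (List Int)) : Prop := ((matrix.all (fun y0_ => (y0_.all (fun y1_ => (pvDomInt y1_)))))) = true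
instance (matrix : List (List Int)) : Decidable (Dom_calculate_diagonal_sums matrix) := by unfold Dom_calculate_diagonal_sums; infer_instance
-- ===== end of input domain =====

-- B replaces A's nested i/j loop with one pass per row (diagonal element + two slice sums); objective: simpler.


-- ===== PORT A =====
def calculate_diagonal_sums (matrix : List (List Int)) : Int × Int × Int :=
  let n : Int := matrix.length
  (PySem.List.pyRange 0 n 1).foldl (fun s i =>
    (PySem.List.pyRange 0 n 1).foldl (fun s j =>
      let v := PySem.List.pyGetD (PySem.List.pyGetD matrix i []) j 0
      if i == j then (s.1 + v, s.2.1, s.2.2)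
      else if i < j then (s.1, s.2.1 + v, s.2.2)
      else (s.1, s.2.1, s.2.2 + v)) s) (0, 0, 0)

-- ===== PORT B =====
def calculate_diagonal_sums_alt (matrix : List (List Int)) : Int × Int × Int :=
  let n : Int := matrix.length
  (PySem.List.enumerate matrix 0).foldl (fun s p =>
    (s.1 + PySem.List.pyGetD p.2 p.1 0,
     s.2.1 + (PySem.List.slice p.2 (some (p.1 + 1)) (some n)).sum,
     s.2.2 + (PySem.List.slice p.2 none (some p.1)).sum)) (0, 0, 0)

-- ===== PRECONDITION & SPEC =====
-- Exactly the inputs on which A returns: every row must have at least n = len(matrix)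
-- entries, otherwise A's inner loop raises IndexError.
def Pre_calculate_diagonal_sums (matrix : List (List Int)) : Prop :=
  ∀ row ∈ matrix, matrix.length ≤ row.length
instance (matrix : List (List Int)) : Decidable (Pre_calculate_diagonal_sums matrix) := by
  unfold Pre_calculate_diagonal_sums; infer_instance
def pvWitness_calculate_diagonal_sums : List (List Int) := [[1, 2], [3, 4]]

def Spec_calculate_diagonal_sums (matrix : List (List Int)) (out : Int × Int × Int) : Prop := out = calculate_diagonal_sums_alt matrix
instance (matrix : List (List Int)) (out : Int × Int × Int) : Decidable (Spec_calculate_diagonal_sums matrix out) := by unfold Spec_calculate_diagonal_sums; infer_instance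

-- ===== CLAIM (what is proved, stated in full; the proofs are below) =====
def Claim_equal_calculate_diagonal_sums : Prop := ∀ (matrix : List (List Int)), Dom_calculate_diagonal_sums matrix → Pre_calculate_diagonal_sums matrix → Spec_calculate_diagonal_sums matrix (calculate_diagonal_sums matrix)

-- ===== LEMMAS AND PROOFS =====

-- Closed form both loops compute: per row i (rows left to process), add the diagonal
-- element, the sum of columns i+1..n-1 and the sum of columns 0..i-1.
def pvDiagStep (n : Nat) (rows : List (List Int)) (i : Nat) (s : Int × Int × Int) : Int × Int × Int :=
  match rows with
  | [] => s
  | r :: rs => pvDiagStep n rs (i + 1)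
      (s.1 + r.getD i 0, s.2.1 + ((r.drop (i + 1)).take (n - (i + 1))).sum, s.2.2 + (r.take i).sum)

theorem b_loop (n : Nat) (rows : List (List Int)) (i : Nat) (s : Int × Int × Int) :
    (PySem.List.enumerate rows (i : Int)).foldl (fun s p =>
      (s.1 + PySem.List.pyGetD p.2 p.1 0,
       s.2.1 + (PySem.List.slice p.2 (some (p.1 + 1)) (some (n : Int))).sum,
       s.2.2 + (PySem.List.slice p.2 none (some p.1)).sum)) s = pvDiagStep n rows i s := by
  induction rows generalizing i s with
  | nil => simp [PySem.List.enumerate_nil, pvDiagStep]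
  | cons r rs ih =>
    rw [PySem.List.enumerate_cons, List.foldl_cons]
    have h1 : ((i : Int) + 1) = ((i + 1 : Nat) : Int) := by push_cast; ring
    simp only [h1, PySem.List.slice_natCast, PySem.List.slice_to_natCast,
      PySem.List.pyGetD_natCast]
    rw [pvDiagStep, ih]

theorem take_succ_sum (r : List Int) (i : Nat) (h : i < r.length) :
    (r.take (i + 1)).sum = (r.take i).sum + r.getD i 0 := by
  rw [List.take_add_one, List.sum_append, List.getElem?_eq_getElem h]
  simp [List.getD_eq_getElem?_getD, List.getElem?_eq_getElem h]

-- A's inner loop over j in range(n), for fixed row r and outer index i, with n ≤ len r.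
theorem a_inner (r : List Int) (i : Nat) :
    ∀ (n : Nat), n ≤ r.length → ∀ (s : Int × Int × Int),
    (PySem.List.pyRange 0 (n : Int) 1).foldl (fun s j =>
      let v := PySem.List.pyGetD r j 0
      if (i : Int) == j then (s.1 + v, s.2.1, s.2.2)
      else if (i : Int) < j then (s.1, s.2.1 + v, s.2.2)
      else (s.1, s.2.1, s.2.2 + v)) s =
    (s.1 + (if i < n then r.getD i 0 else 0),
     s.2.1 + ((r.drop (i + 1)).take (n - (i + 1))).sum,
     s.2.2 + (r.take (min i n)).sum) := by
  intro n
  induction n with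
  | zero =>
    intro _ s
    simp [PySem.List.pyRange_one_eq_nil]
  | succ m ih =>
    intro hlen s
    have hm : m < r.length := by omega
    have hsplit : PySem.List.pyRange 0 ((m + 1 : Nat) : Int) 1
        = PySem.List.pyRange 0 (m : Int) 1 ++ [(m : Int)] := by
      have : ((m + 1 : Nat) : Int) = (m : Int) + 1 := by push_cast; ring
      rw [this, PySem.List.pyRange_one_succ_right (by positivity)]
    rw [hsplit, List.foldl_append, ih (by omega) s, List.foldl_cons, List.foldl_nil]
    simp only [PySem.List.pyGetD_natCast]
    rcases lt_trichotomy i m with hlt | heq | hgt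
    · -- j = m > i : above-diagonal branch
      have hne : ((i : Int) == (m : Int)) = false := by simp; omega
      have hcmp : (i : Int) < (m : Int) := by exact_mod_cast hlt
      simp only [hne, Bool.false_eq_true, if_false, if_pos hcmp]
      have hdt : ((r.drop (i + 1)).take (m + 1 - (i + 1))).sum
          = ((r.drop (i + 1)).take (m - (i + 1))).sum + r.getD m 0 := by
        have hml : m - (i + 1) < (r.drop (i + 1)).length := by
          simp [List.length_drop]; omega
        have : m + 1 - (i + 1) = (m - (i + 1)) + 1 := by omega
        rw [this, take_succ_sum _ _ hml]
        congr 1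
        rw [List.getD_eq_getElem?_getD, List.getD_eq_getElem?_getD, List.getElem?_drop]
        congr 2
        omega
      have hif : (if i < m then r.getD i 0 else 0) = (if i < m + 1 then r.getD i 0 else 0) := by
        rw [if_pos hlt, if_pos (show i < m + 1 by omega)]
      have hmin : min i m = min i (m + 1) := by omega
      rw [hif, hmin, hdt]
      simp [Prod.ext_iff]
      ring
    · -- j = m = i : main-diagonal branch
      subst heq
      simp only [beq_self_eq_true, if_true]
      have h1 : (if i < i then r.getD i 0 else 0) = 0 := by simp
      have h2 : i + 1 - (i + 1) = 0 := by omega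
      have h3 : min i i = i := by omega
      have h4 : (if i < i + 1 then r.getD i 0 else 0) = r.getD i 0 := by simp
      have h5 : min i (i + 1) = i := by omega
      rw [h1, h2, h3, h4, h5]
      simp
    · -- j = m < i : below-diagonal branch
      have hne : ((i : Int) == (m : Int)) = false := by simp; omega
      have hcmp : ¬ ((i : Int) < (m : Int)) := by exact_mod_cast (show ¬ i < m by omega)
      simp only [hne, Bool.false_eq_true, if_false, if_neg hcmp]
      have hif : (if i < m then r.getD i 0 else 0) = (if i < m + 1 then r.getD i 0 else 0) := by
        rw [if_neg (show ¬ i < m by omega), if_neg (show ¬ i < m + 1 by omega)]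
      have hd : m - (i + 1) = 0 ∧ m + 1 - (i + 1) = 0 := by omega
      have hmin1 : min i m = m := by omega
      have hmin2 : min i (m + 1) = m + 1 := by omega
      rw [hif, hd.1, hd.2, hmin1, hmin2, take_succ_sum _ _ hm]
      simp [Prod.ext_iff]
      ring

theorem a_loop (matrix : List (List Int)) (hpre : Pre_calculate_diagonal_sums matrix) :
    ∀ (k : Nat), k ≤ matrix.length → ∀ (s : Int × Int × Int),
    (PySem.List.pyRange (k : Int) (matrix.length : Int) 1).foldl (fun s i =>
      (PySem.List.pyRange 0 (matrix.length : Int) 1).foldl (fun s j =>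
        let v := PySem.List.pyGetD (PySem.List.pyGetD matrix i []) j 0
        if i == j then (s.1 + v, s.2.1, s.2.2)
        else if i < j then (s.1, s.2.1 + v, s.2.2)
        else (s.1, s.2.1, s.2.2 + v)) s) s
    = pvDiagStep matrix.length (matrix.drop k) k s := by
  intro k
  induction hk : matrix.length - k generalizing k with
  | zero =>
    intro hle s
    have hke : k = matrix.length := by omega
    have hnil : PySem.List.pyRange (k : Int) (matrix.length : Int) 1 = [] :=
      PySem.List.pyRange_one_eq_nil (by exact_mod_cast hke.ge)
    rw [hnil, List.foldl_nil, List.drop_eq_nil_of_le (by omega)]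
    rfl
  | succ m ih =>
    intro hle s
    have hklt : k < matrix.length := by omega
    have hcast : ((k : Int)) < (matrix.length : Int) := by exact_mod_cast hklt
    rw [PySem.List.pyRange_one_cons hcast, List.foldl_cons]
    have hrow : PySem.List.pyGetD matrix (k : Int) [] = matrix[k] := by
      rw [PySem.List.pyGetD_natCast, List.getD_eq_getElem?_getD, List.getElem?_eq_getElem hklt]
      rfl
    have hmem : matrix[k] ∈ matrix := List.getElem_mem hklt
    have hlen : matrix.length ≤ (matrix[k]).length := hpre _ hmem
    have hdrop : matrix.drop k = matrix[k] :: matrix.drop (k + 1) :=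
      List.drop_eq_getElem_cons hklt
    rw [hdrop, pvDiagStep]
    have hinner := a_inner (matrix[k]) k matrix.length hlen s
    simp only [hrow]
    rw [hinner]
    have h1 : ((k : Int) + 1) = ((k + 1 : Nat) : Int) := by push_cast; ring
    rw [h1, ih (k + 1) (by omega) (by omega)]
    congr 2
    · simp [hklt]
    · rw [min_eq_left (by omega)]

-- ===== VERDICT (by name: the statement is the Claim_ definition above) =====
theorem calculate_diagonal_sums_spec : Claim_equal_calculate_diagonal_sums := by
  intro matrix _ hpre
  unfold Spec_calculate_diagonal_sums calculate_diagonal_sums calculate_diagonal_sums_alt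
  have hA := a_loop matrix hpre 0 (by omega) (0, 0, 0)
  have hB := b_loop matrix.length matrix 0 (0, 0, 0)
  simp only [Nat.cast_zero] at hA hB
  simp only [List.drop_zero] at hA
  rw [hA, hB]
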